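-- pv_equiv track=rewrite | github.com/FatihMurathan1453/BLM101_25360859015_FatihMurathanUcar | kodlar/Çok Fonksiyonlu Taban Dönüştürücü.py | bellek_gosterimi
-- ===== SOURCE A (Python) =====
-- def bellek_gosterimi(sayi, bitsayisi):          #sayıların bellekte gösterimi için fonksiyon
--     mod = 1                                     #mod değerini 1'e atama
--     for _ in range(bitsayisi):                  #mod değerini ayarlamak için for döngüsü
--         mod *= 2                                #mod değerine modun 2 katını atama
--
--     val = sayi % mod                            #sayi'nin mod değeriyle modunu val değerine atama
--
--     byte_sayisi = bitsayisi // 8                #byte_sayisi değişkenine bitsayisinin 8 ile bölümünü atama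
--     kutular = []                                #rakam karakterlerinin saklanacağı diziyi oluşturma
--
--     for _ in range(byte_sayisi):                #her bir byte için işlemleri tekrarlama döngüsü
--         byte = val % 256                        #byte değişkenine val'in son 8 bitini atama (0-255 aralığı)
--         val //= 256                             #val değişkenini 256'ya bölerek bir sonraki byte'a ilerletme
--
--         b = ""                                  #b için boş bir string oluşturma
--         temp = byte                             #byte değişkeninin değerini temp değişkenine atama
--         for _ in range(8):                      #her bit pozisyonunu hesaplamak için 8 kez döngü
--             b = str(temp % 2) + b               #mevcut bitten bir karakter oluşturup b stringinin başına ekleme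
--             temp //= 2                          #temp'i 2'ye bölerek bir sonraki bite kaydırma
--
--         kutular.insert(0, "[" + b + "]")  #oluşturulan byte gösterimini kutular listesinin başına (0. indis) ekleme
--
--     sonuc = ""                                  #sonuc için boş bir string oluşturma
--     for k in kutular:                           #her kutuyu sırayla sonuç stringine eklemek için döngü
--         sonuc += k + " "                        #her eklemede kutular arasında bir boşluk bırakma
--
--     return sonuc.strip()                        #sonuçlarda kalan gereksiz boşlukları silme
-- ===== SOURCE B (Python) =====
-- def bellek_gosterimi(sayi, bitsayisi):
--     # Single flat pass over the bit positions, MSB first: the bracket and space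
--     # separators are emitted inline at byte boundaries, so there is no per-byte
--     # loop, no list of boxes, no insert(0) and no final strip.
--     byte_sayisi = bitsayisi // 8
--     if byte_sayisi <= 0:
--         return ""
--     nbits = byte_sayisi * 8
--     v = sayi % (2 ** nbits)
--     out = []
--     for i in range(nbits - 1, -1, -1):
--         if i % 8 == 7:
--             out.append("[" if i == nbits - 1 else " [")
--         out.append("1" if (v >> i) & 1 else "0")
--         if i % 8 == 0:
--             out.append("]")
--     return "".join(out)
-- ===== Notes on version B (the rewrite author's own statement) =====
-- stated objective: faster
-- what changed: B replaces A's staged nested loops (modulus-doubling loop, per-byte division loop building a list with insert(0), per-bit string-prepend loop, then quadratic string concatenation and strip) by ONE flat MSB-first pass over the bit positions that tests each bit with (v >> i) & 1 and emits the '[', ']' and space separators inline at byte boundaries into a list joined once at the end.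
import Mathlib
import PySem

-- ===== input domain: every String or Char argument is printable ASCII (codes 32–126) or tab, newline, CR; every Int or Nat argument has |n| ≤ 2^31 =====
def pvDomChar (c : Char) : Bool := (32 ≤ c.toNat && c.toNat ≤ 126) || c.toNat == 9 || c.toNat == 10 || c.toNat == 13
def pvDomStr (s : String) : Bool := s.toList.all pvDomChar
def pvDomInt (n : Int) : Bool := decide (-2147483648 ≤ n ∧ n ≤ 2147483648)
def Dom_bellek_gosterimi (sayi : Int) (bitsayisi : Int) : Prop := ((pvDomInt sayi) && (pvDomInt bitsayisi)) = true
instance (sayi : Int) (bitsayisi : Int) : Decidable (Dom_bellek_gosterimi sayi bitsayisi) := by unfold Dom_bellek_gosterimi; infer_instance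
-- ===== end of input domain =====

-- B replaces A's staged nested loops (modulus doubling, per-byte division with insert(0),
-- per-bit prepend, then concatenate-and-strip) by ONE flat MSB-first pass over the bit
-- positions that emits the brackets and spaces inline at byte boundaries (objective: alternative).

-- ===== PORT A =====
def bellek_gosterimi (sayi : Int) (bitsayisi : Int) : String :=
  -- mod = 1; for _ in range(bitsayisi): mod *= 2
  let mod := (PySem.List.pyRange 0 bitsayisi 1).foldl (fun m _ => m * 2) (1 : Int)
  let val := PySem.Int.mod sayi mod
  let byte_sayisi := PySem.Int.floordiv bitsayisi 8
  -- for _ in range(byte_sayisi): …  (state = (val, kutular))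
  let st := (PySem.List.pyRange 0 byte_sayisi 1).foldl
    (fun (st : Int × List String) _ =>
      let byte := PySem.Int.mod st.1 256
      let val' := PySem.Int.floordiv st.1 256
      -- b = ""; temp = byte; for _ in range(8): b = str(temp % 2) + b; temp //= 2
      let b := (PySem.List.pyRange 0 8 1).foldl
        (fun (bt : String × Int) _ =>
          (PySem.Int.toStr (PySem.Int.mod bt.2 2) ++ bt.1, PySem.Int.floordiv bt.2 2))
        ("", byte)
      (val', PySem.List.insert st.2 0 ("[" ++ b.1 ++ "]")))
    (val, ([] : List String))
  -- sonuc = ""; for k in kutular: sonuc += k + " "; return sonuc.strip()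
  let sonuc := st.2.foldl (fun s k => s ++ (k ++ " ")) ""
  PySem.Str.strip sonuc

-- ===== PORT B =====
def bellek_gosterimi_alt (sayi : Int) (bitsayisi : Int) : String :=
  let byte_sayisi := PySem.Int.floordiv bitsayisi 8
  if byte_sayisi ≤ 0 then "" else
  let nbits := byte_sayisi * 8
  -- v = sayi % (2 ** nbits); nbits ≥ 8 here so the Nat exponent is exact
  let v := PySem.Int.mod sayi ((2 : Int) ^ nbits.toNat)
  -- one flat pass i = nbits-1 .. 0; i ≥ 0 on this range so the Nat shift amount is exact
  PySem.Str.join ""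
    ((PySem.List.pyRange (nbits - 1) (-1) (-1)).foldl
      (fun (out : List String) (i : Int) =>
        let out1 := if PySem.Int.mod i 8 = 7 then
            out ++ [if i = nbits - 1 then "[" else " ["] else out
        let out2 := out1 ++ [if PySem.Int.band (v >>> i.toNat) 1 ≠ 0 then "1" else "0"]
        if PySem.Int.mod i 8 = 0 then out2 ++ ["]"] else out2)
      [])

-- ===== PRECONDITION & SPEC =====
def Spec_bellek_gosterimi (sayi : Int) (bitsayisi : Int) (out : String) : Prop := out = bellek_gosterimi_alt sayi bitsayisi
instance (sayi : Int) (bitsayisi : Int) (out : String) : Decidable (Spec_bellek_gosterimi sayi bitsayisi out) := by unfold Spec_bellek_gosterimi; infer_instance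

-- ===== CLAIM (what is proved, stated in full; the proofs are below) =====
def Claim_equal_bellek_gosterimi : Prop := ∀ (sayi : Int) (bitsayisi : Int), Dom_bellek_gosterimi sayi bitsayisi → Spec_bellek_gosterimi sayi bitsayisi (bellek_gosterimi sayi bitsayisi)

-- ===== LEMMAS AND PROOFS =====

-- MSB-first w-bit binary representation of v (the common value both ports' byte strings reduce to)
def pvBits : Nat → Nat → List Char
  | 0, _ => []
  | w+1, v => pvBits w (v / 2) ++ [if v % 2 = 1 then '1' else '0']

def pvBox (b : Nat) : String := String.ofList ('[' :: (pvBits 8 b ++ [']']))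

-- B's flat loop body, with nbits = 8*n and v = ↑m substituted (defeq to the port's lambda)
def pvG (n m : Nat) (out : List String) (i : Int) : List String :=
  let out1 := if PySem.Int.mod i 8 = 7 then
      out ++ [if i = ((8*n : Nat) : Int) - 1 then "[" else " ["] else out
  let out2 := out1 ++ [if PySem.Int.band (((m : Nat) : Int) >>> i.toNat) 1 ≠ 0 then "1" else "0"]
  if PySem.Int.mod i 8 = 0 then out2 ++ ["]"] else out2

def pvBitStr (m u : Nat) : String := if m / 2^u % 2 = 1 then "1" else "0"

-- the pieces B appends while scanning byte j (j = 0 is the leftmost, most significant byte)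
def pvChunk (n m j : Nat) : List String :=
  (if j = 0 then ["["] else [" ["]) ++
  (List.range 8).map (fun t => pvBitStr m (8*(n-1-j)+7-t)) ++ ["]"]

theorem pvFoldlConst {α β : Type} (l : List α) (f : β → β) (i : β) :
    l.foldl (fun a _ => f a) i = f^[l.length] i := by
  induction l generalizing i with
  | nil => rfl
  | cons x t ih => simp [List.foldl_cons, ih, Function.iterate_succ_apply]

theorem pvModFold (l : List Int) (c : Int) :
    l.foldl (fun m _ => m * 2) c = c * 2 ^ l.length := by
  induction l generalizing c with
  | nil => simp
  | cons x t ih => simp [List.foldl_cons, ih]; ring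

theorem pvBits_succ_front (w v : Nat) :
    pvBits (w+1) v = (if v / 2 ^ w % 2 = 1 then '1' else '0') :: pvBits w v := by
  induction w generalizing v with
  | zero => simp [pvBits]
  | succ w ih =>
      show pvBits (w+1) (v / 2) ++ _ = _
      rw [ih (v / 2)]
      simp [pvBits, Nat.div_div_eq_div_mul]
      rw [show 2 * 2 ^ w = 2 ^ (w+1) by ring]

theorem pvBits_eq_map (w v : Nat) :
    pvBits w v = (List.range w).map (fun t => if v / 2 ^ (w-1-t) % 2 = 1 then '1' else '0') := by
  induction w generalizing v with
  | zero => rfl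
  | succ w ih =>
      rw [pvBits_succ_front, ih, List.range_succ_eq_map, List.map_cons, List.map_map]
      simp only [Nat.add_sub_cancel, Nat.sub_zero]
      congr 1
      refine List.map_congr_left (fun t ht => ?_)
      simp only [Function.comp_apply]
      rw [show w - 1 - t = w - (t + 1) by omega]

theorem pvInner (w m : Nat) (cs : List Char) :
    (fun (bt : String × Int) =>
        (PySem.Int.toStr (PySem.Int.mod bt.2 2) ++ bt.1, PySem.Int.floordiv bt.2 2))^[w]
      (String.ofList cs, ((m : Nat) : Int))
    = (String.ofList (pvBits w m ++ cs), ((m / 2 ^ w : Nat) : Int)) := by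
  induction w with
  | zero => simp [pvBits]
  | succ w ih =>
      rw [Function.iterate_succ_apply', ih]
      have hm : PySem.Int.mod ((m / 2 ^ w : Nat) : Int) 2 = ((m / 2 ^ w % 2 : Nat) : Int) := by
        exact_mod_cast PySem.Int.mod_natCast (m / 2 ^ w) 2
      have hd : PySem.Int.floordiv ((m / 2 ^ w : Nat) : Int) 2 = ((m / 2 ^ (w+1) : Nat) : Int) := by
        rw [show m / 2 ^ (w+1) = m / 2 ^ w / 2 by rw [Nat.div_div_eq_div_mul, pow_succ]]
        exact_mod_cast PySem.Int.floordiv_natCast (m / 2 ^ w) 2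
      simp only [hm, hd, pvBits_succ_front]
      rcases Nat.mod_two_eq_zero_or_one (m / 2 ^ w) with h | h <;>
        · rw [h]
          refine Prod.ext ?_ rfl
          apply String.toList_inj.mp
          simp [PySem.Int.toStr,
            show PySem.Int.toChars 0 = ['0'] from rfl,
            show PySem.Int.toChars 1 = ['1'] from rfl]

theorem pvOuter (n m : Nat) (kut : List String) :
    (fun (st : Int × List String) =>
        (PySem.Int.floordiv st.1 256,
         PySem.List.insert st.2 0 ("[" ++
           ((PySem.List.pyRange 0 8 1).foldl
             (fun (bt : String × Int) _ =>
               (PySem.Int.toStr (PySem.Int.mod bt.2 2) ++ bt.1, PySem.Int.floordiv bt.2 2))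
             ("", PySem.Int.mod st.1 256)).1 ++ "]")))^[n]
      (((m : Nat) : Int), kut)
    = (((m / 256 ^ n : Nat) : Int),
       ((List.range n).map (fun j => pvBox (m / 256 ^ (n - 1 - j) % 256))) ++ kut) := by
  induction n with
  | zero => simp
  | succ n ih =>
      rw [Function.iterate_succ_apply', ih]
      have hb : PySem.Int.mod ((m / 256 ^ n : Nat) : Int) 256 = ((m / 256 ^ n % 256 : Nat) : Int) := by
        exact_mod_cast PySem.Int.mod_natCast (m / 256 ^ n) 256
      have hd : PySem.Int.floordiv ((m / 256 ^ n : Nat) : Int) 256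
          = ((m / 256 ^ (n+1) : Nat) : Int) := by
        rw [show m / 256 ^ (n+1) = m / 256 ^ n / 256 by rw [Nat.div_div_eq_div_mul, pow_succ]]
        exact_mod_cast PySem.Int.floordiv_natCast (m / 256 ^ n) 256
      rw [pvFoldlConst]
      simp only [show (PySem.List.pyRange 0 8 1).length = 8 from rfl,
        show ("" : String) = String.ofList [] from rfl, hb, hd,
        pvInner 8 (m / 256 ^ n % 256) [], PySem.List.insert_zero]
      refine Prod.ext rfl ?_
      have hbox : ("[" ++ String.ofList (pvBits 8 (m / 256 ^ n % 256) ++ []) ++ "]")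
          = pvBox (m / 256 ^ n % 256) := by
        apply String.toList_inj.mp; simp [pvBox]
      rw [hbox, List.range_succ_eq_map, List.map_cons, List.map_map]
      simp only [Nat.add_sub_cancel, Nat.sub_zero, List.cons_append]
      congr 2
      refine List.map_congr_left (fun j hj => ?_)
      simp only [Function.comp_apply, Nat.succ_eq_add_one]
      have e : n - 1 - j = n - (j + 1) := by omega
      rw [e]

theorem pvSonuc (L : List String) (s : String) :
    (L.foldl (fun s k => s ++ (k ++ " ")) s).toList
      = s.toList ++ ((L.map String.toList).map (· ++ [' '])).flatten := by
  induction L generalizing s with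
  | nil => simp
  | cons a t ih => simp [ih, String.toList_append]

theorem pvRstrip_append (x y : List Char) (h : PySem.Chars.rstrip y ≠ []) :
    PySem.Chars.rstrip (x ++ y) = x ++ PySem.Chars.rstrip y := by
  unfold PySem.Chars.rstrip at *
  rw [List.reverse_append, List.dropWhile_append]
  cases hdw : List.dropWhile PySem.Chars.isspace y.reverse with
  | nil => exact absurd (by rw [hdw]; rfl) h
  | cons c cs => simp

theorem pvRstrip_box (mid : List Char) :
    PySem.Chars.rstrip (('[' :: (mid ++ [']'])) ++ [' ']) = '[' :: (mid ++ [']']) := by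
  unfold PySem.Chars.rstrip
  have : (('[' :: (mid ++ [']'])) ++ [' ']).reverse = ' ' :: ']' :: (mid.reverse ++ ['[']) := by
    simp
  rw [this]
  rw [List.dropWhile_cons_of_pos (by rfl), List.dropWhile_cons_of_neg (by simp [PySem.Chars.isspace])]
  simp

theorem pvIntercalate_ne_nil (b : List Char) (t : List (List Char)) (hb : b ≠ []) :
    List.intercalate [' '] (b :: t) ≠ [] := by
  cases t <;> simp [List.intercalate, hb]

theorem pvRstripJoin (Ls : List (List Char))
    (h : ∀ l ∈ Ls, ∃ mid, l = '[' :: (mid ++ [']'])) :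
    PySem.Chars.rstrip ((Ls.map (· ++ [' '])).flatten) = List.intercalate [' '] Ls := by
  induction Ls with
  | nil => simp [List.intercalate]; rfl
  | cons a t ih =>
      obtain ⟨mid, ha⟩ := h a (by simp)
      cases t with
      | nil =>
          rw [show ((([a]).map (· ++ [' '])).flatten) = a ++ [' '] by simp,
              show List.intercalate [' '] [a] = a by simp [List.intercalate], ha]
          exact pvRstrip_box mid
      | cons b t' =>
          have hshape := fun l hl => h l (List.mem_cons_of_mem a hl)
          obtain ⟨midb, hbsh⟩ := h b (by simp)
          have hrec := ih hshape
          have hne : PySem.Chars.rstrip (((b :: t').map (· ++ [' '])).flatten) ≠ [] := by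
            rw [hrec]
            exact pvIntercalate_ne_nil b t' (by rw [hbsh]; simp)
          have hfl : (((a :: b :: t').map (· ++ [' '])).flatten)
              = (a ++ [' ']) ++ ((b :: t').map (· ++ [' '])).flatten := by simp
          rw [hfl, pvRstrip_append _ _ (by
            intro hc; exact hne hc), hrec]
          simp [List.intercalate]

theorem pvStripJoin (Ls : List (List Char))
    (h : ∀ l ∈ Ls, ∃ mid, l = '[' :: (mid ++ [']'])) :
    PySem.Chars.strip ((Ls.map (· ++ [' '])).flatten) = List.intercalate [' '] Ls := by
  cases Ls with
  | nil => simp [PySem.Chars.strip, PySem.Chars.lstrip, PySem.Chars.rstrip, List.intercalate]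
  | cons a t =>
      obtain ⟨mid, ha⟩ := h a (by simp)
      have hfl : (((a :: t).map (· ++ [' '])).flatten)
          = ('[' :: (mid ++ [']'] ++ [' '])) ++ (t.map (· ++ [' '])).flatten := by
        simp [ha]
      unfold PySem.Chars.strip
      rw [show PySem.Chars.lstrip (((a :: t).map (· ++ [' '])).flatten)
            = ((a :: t).map (· ++ [' '])).flatten by
          rw [hfl]
          unfold PySem.Chars.lstrip
          rw [List.cons_append, List.dropWhile_cons_of_neg (by decide)]]
      exact pvRstripJoin _ h

theorem pvByteEq (m n k : Nat) (hk : k < n) :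
    m % 2 ^ (8 * n) / 2 ^ (8 * k) % 256 = m / 2 ^ (8 * k) % 256 := by
  have h256 : (256 : Nat) = 2 ^ 8 := by norm_num
  rw [h256, ← Nat.mod_mul_right_div_self, ← Nat.mod_mul_right_div_self,
      ← pow_add, Nat.mod_mod_of_dvd _ (pow_dvd_pow 2 (by omega))]

-- discarding the high bits above position e does not change bit e
theorem pvBitMask (x a e : Nat) (h : e < a) :
    x % 2 ^ a / 2 ^ e % 2 = x / 2 ^ e % 2 := by
  rw [show (2:Nat) ^ a = 2 ^ e * 2 ^ (a - e) by rw [← pow_add]; congr 1; omega,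
      Nat.mod_mul_right_div_self, Nat.mod_mod_of_dvd _ (dvd_pow_self 2 (by omega))]

-- one step of B's flat loop, in Nat form
theorem pvG_eval (n m : Nat) (acc : List String) (u : Nat) (hu : u < 8*n) :
    pvG n m acc ((u : Nat) : Int)
    = (if u % 8 = 7 then acc ++ [if u = 8*n - 1 then "[" else " ["] else acc)
      ++ [pvBitStr m u] ++ (if u % 8 = 0 then ["]"] else []) := by
  have hmod : PySem.Int.mod ((u:Nat):Int) 8 = ((u % 8 : Nat) : Int) := by
    exact_mod_cast PySem.Int.mod_natCast u 8
  have hband : PySem.Int.band ((m / 2^u : Nat) : Int) 1 = ((m / 2^u % 2 : Nat) : Int) := by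
    have h1 := PySem.Int.band_natCast (m / 2^u) 1
    rw [Nat.and_one_is_mod] at h1
    exact_mod_cast h1
  have c7 : (PySem.Int.mod ((u:Nat):Int) 8 = 7) = (u % 8 = 7) := by
    rw [hmod]; apply propext; omega
  have c0 : (PySem.Int.mod ((u:Nat):Int) 8 = 0) = (u % 8 = 0) := by
    rw [hmod]; apply propext; omega
  have ceq : (((u:Nat):Int) = ((8*n : Nat) : Int) - 1) = (u = 8*n - 1) := by
    apply propext; omega
  simp only [pvG, pvBitStr, Int.toNat_natCast, ← Int.natCast_shiftRight,
    Nat.shiftRight_eq_div_pow, hband, c7, c0, ceq]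
  have cbit : ((((m / 2^u % 2 : Nat) : Int)) ≠ 0) = (m / 2^u % 2 = 1) := by
    apply propext; omega
  simp only [cbit]
  by_cases h0 : u % 8 = 0 <;> simp [h0, List.append_assoc]

-- folding B's loop over the first 8*j positions produces the first j byte chunks
theorem pvChunks (n m : Nat) : ∀ (j : Nat), j ≤ n → ∀ (acc : List String),
    (List.range (8*j)).foldl
      (fun acc k => pvG n m acc ((((8*n : Nat) : Int) - 1) - ((k : Nat) : Int))) acc
    = acc ++ ((List.range j).map (pvChunk n m)).flatten := by
  intro j
  induction j with
  | zero => intro _ acc; simp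
  | succ j ih =>
      intro hj acc
      rw [show 8*(j+1) = 8*j + 8 by ring, List.range_add, List.foldl_append,
          ih (by omega) acc, List.foldl_map]
      have harg : ∀ t : Nat, t < 8 →
          ((((8*n : Nat) : Int) - 1) - (((8*j + t : Nat)) : Int))
            = (((8*(n-1-j)+7-t : Nat)) : Int) := by
        intro t ht; omega
      have hrange8 : List.range 8 = [0,1,2,3,4,5,6,7] := by decide
      rw [hrange8]
      simp only [List.foldl_cons, List.foldl_nil]
      rw [harg 0 (by norm_num), harg 1 (by norm_num), harg 2 (by norm_num),
          harg 3 (by norm_num), harg 4 (by norm_num), harg 5 (by norm_num),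
          harg 6 (by norm_num), harg 7 (by norm_num)]
      rw [pvG_eval n m _ _ (by omega), pvG_eval n m _ _ (by omega),
          pvG_eval n m _ _ (by omega), pvG_eval n m _ _ (by omega),
          pvG_eval n m _ _ (by omega), pvG_eval n m _ _ (by omega),
          pvG_eval n m _ _ (by omega), pvG_eval n m _ _ (by omega)]
      have hsep : (8*(n-1-j)+7-0 = 8*n - 1) = (j = 0) := by
        apply propext; omega
      have m7 : ∀ t : Nat, t < 8 → ((8*(n-1-j)+7-t) % 8 : Nat) = 7 - t := by
        intro t ht; omega
      simp only [hsep, m7 0 (by norm_num), m7 1 (by norm_num), m7 2 (by norm_num),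
        m7 3 (by norm_num), m7 4 (by norm_num), m7 5 (by norm_num),
        m7 6 (by norm_num), m7 7 (by norm_num)]
      rw [List.range_succ]
      simp only [List.map_append, List.map_cons, List.map_nil, List.flatten_append,
        List.flatten_cons, List.flatten_nil, pvChunk, hrange8]
      norm_num
      by_cases h0 : j = 0 <;> simp [h0]

theorem pvFlattenSingleton {α β : Type} (l : List α) (f : α → β) :
    (l.map (fun x => [f x])).flatten = l.map f := by
  induction l with
  | nil => rfl
  | cons a t ih => simp [ih]

theorem pvChunkChars (n m j : Nat) :
    ((pvChunk n m j).map String.toList).flatten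
    = (if j = 0 then ([] : List Char) else [' '])
      ++ ('[' :: (pvBits 8 (m / 256^(n-1-j) % 256) ++ [']'])) := by
  have hbits : pvBits 8 (m / 256^(n-1-j) % 256)
      = (List.range 8).map (fun t => if m / 2^(8*(n-1-j)+7-t) % 2 = 1 then '1' else '0') := by
    rw [pvBits_eq_map]
    refine List.map_congr_left (fun t ht => ?_)
    have ht8 : t < 8 := List.mem_range.mp ht
    have hkey : m / 256^(n-1-j) % 256 / 2^(8-1-t) % 2 = m / 2^(8*(n-1-j)+7-t) % 2 := by
      rw [show (256:Nat)^(n-1-j) = 2^(8*(n-1-j)) by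
            rw [show (256:Nat) = 2^8 by norm_num, ← pow_mul],
          show (256:Nat) = 2^8 by norm_num,
          pvBitMask _ 8 (8-1-t) (by omega),
          Nat.div_div_eq_div_mul, ← pow_add,
          show 8*(n-1-j) + (8-1-t) = 8*(n-1-j)+7-t by omega]
    rw [hkey]
  have hone : ∀ t : Nat, String.toList (pvBitStr m (8*(n-1-j)+7-t))
      = [if m / 2^(8*(n-1-j)+7-t) % 2 = 1 then '1' else '0'] := by
    intro t; unfold pvBitStr
    by_cases h : m / 2^(8*(n-1-j)+7-t) % 2 = 1 <;> simp [h]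
  rw [hbits]
  have hmid : ((List.range 8).map (fun t => pvBitStr m (8*(n-1-j)+7-t))).map String.toList
      = (List.range 8).map (fun t => [if m / 2^(8*(n-1-j)+7-t) % 2 = 1 then '1' else '0']) := by
    rw [List.map_map]
    exact List.map_congr_left (fun t _ => hone t)
  simp only [pvChunk, List.map_append, List.flatten_append, hmid, pvFlattenSingleton]
  by_cases h0 : j = 0 <;> simp [h0]

theorem pvInterCC {α : Type} (s a b : List α) (t : List (List α)) :
    List.intercalate s (a :: b :: t) = a ++ s ++ List.intercalate s (b :: t) := by
  simp [List.intercalate, List.append_assoc]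

theorem pvIntercalate_append_singleton {α : Type} (s x : List α) :
    ∀ l : List (List α), l ≠ [] →
      List.intercalate s (l ++ [x]) = List.intercalate s l ++ s ++ x := by
  intro l
  induction l with
  | nil => intro h; exact absurd rfl h
  | cons a t ih =>
      intro _
      cases t with
      | nil => simp [List.intercalate]
      | cons b t' =>
          have hih : List.intercalate s (b :: (t' ++ [x]))
              = List.intercalate s (b :: t') ++ s ++ x := ih (by simp)
          simp only [List.cons_append]
          rw [pvInterCC, hih, pvInterCC]
          simp [List.append_assoc]

theorem pvIntercalateNil {α : Type} (l : List (List α)) :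
    List.intercalate ([] : List α) l = l.flatten := by
  induction l with
  | nil => rfl
  | cons a t ih =>
      cases t with
      | nil => simp [List.intercalate]
      | cons b t' =>
          rw [pvInterCC, ih]
          simp

theorem pvIntercalateRange (f : Nat → List Char) :
    ∀ n : Nat, List.intercalate [' '] ((List.range n).map f)
      = ((List.range n).map (fun j => (if j = 0 then ([] : List Char) else [' ']) ++ f j)).flatten := by
  intro n
  induction n with
  | zero => rfl
  | succ n ih =>
      rw [List.range_succ, List.map_append, List.map_append]
      cases n with
      | zero => simp [List.intercalate]
      | succ n' =>
          simp only [List.map_cons, List.map_nil]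
          rw [pvIntercalate_append_singleton [' '] (f (n'+1)) (List.map f (List.range (n'+1)))
                (by simp [List.range_succ]), ih]
          simp [List.append_assoc]

theorem pvFlatFlat (l : List (List String)) :
    ((l.flatten).map String.toList).flatten
      = (l.map (fun c => ((c.map String.toList)).flatten)).flatten := by
  induction l with
  | nil => rfl
  | cons a t ih =>
      simp only [List.flatten_cons, List.map_append, List.flatten_append, ih, List.map_cons]

set_option maxHeartbeats 2000000 in
theorem pvMain (sayi bitsayisi : Int) :
    bellek_gosterimi sayi bitsayisi = bellek_gosterimi_alt sayi bitsayisi := by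
  by_cases hb : PySem.Int.floordiv bitsayisi 8 ≤ 0
  · simp only [bellek_gosterimi, bellek_gosterimi_alt, if_pos hb,
      PySem.List.pyRange_one_eq_nil hb, List.foldl_nil]
    rfl
  · rw [not_le] at hb
    set B := PySem.Int.floordiv bitsayisi 8 with hB
    set n := B.toNat with hn
    set M := bitsayisi.toNat with hM
    have hn1 : 1 ≤ n := by omega
    have hBn : B = (n : Int) := by omega
    have hq : (n : Int) * 8 ≤ bitsayisi :=
      (PySem.Int.le_floordiv_iff_mul_le (by norm_num)).mp (le_of_eq hBn.symm)
    have h8nM : 8 * n ≤ M := by omega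
    set m := (sayi % (2:Int) ^ M).toNat with hm
    have hmodpos : (0:Int) < 2 ^ M := by positivity
    have hval : PySem.Int.mod sayi ((2:Int) ^ M) = (m : Int) := by
      rw [PySem.Int.mod_eq_emod_of_pos hmodpos]
      exact (Int.toNat_of_nonneg (Int.emod_nonneg _ (ne_of_gt hmodpos))).symm
    set L := (List.range n).map (fun j => pvBox (m / 256 ^ (n - 1 - j) % 256)) with hL
    -- A reduces to strip of the box-concatenation loop over L
    have hA : bellek_gosterimi sayi bitsayisi
        = PySem.Str.strip (L.foldl (fun s k => s ++ (k ++ " ")) "") := by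
      simp only [bellek_gosterimi]
      rw [pvModFold, PySem.List.length_pyRange_one, Int.sub_zero, one_mul, ← hM, hval,
        pvFoldlConst, PySem.List.length_pyRange_one, Int.sub_zero, ← hB, ← hn,
        pvOuter n m []]
      rw [List.append_nil]
    have hAchars : (bellek_gosterimi sayi bitsayisi).toList
        = List.intercalate [' ']
            ((List.range n).map (fun j => '[' :: (pvBits 8 (m / 256^(n-1-j) % 256) ++ [']']))) := by
      rw [hA, PySem.Str.toList_strip, pvSonuc,
          show ("" : String).toList = [] from rfl, List.nil_append]
      rw [show L.map String.toList
            = (List.range n).map (fun j => '[' :: (pvBits 8 (m / 256^(n-1-j) % 256) ++ [']'])) by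
          rw [hL, List.map_map]
          refine List.map_congr_left (fun j _ => ?_)
          simp [pvBox]]
      apply pvStripJoin
      intro l hl
      obtain ⟨j, hj, hjl⟩ := List.mem_map.mp hl
      exact ⟨pvBits 8 (m / 256 ^ (n - 1 - j) % 256), hjl.symm⟩
    -- B: the masked value is m % 2^(8n)
    set m' := m % 2^(8*n) with hm'
    have hv : PySem.Int.mod sayi ((2:Int) ^ ((B * 8).toNat)) = ((m' : Nat) : Int) := by
      rw [show ((B * 8).toNat) = 8*n by omega]
      rw [PySem.Int.mod_eq_emod_of_pos (by positivity),
          ← Int.emod_emod_of_dvd sayi (pow_dvd_pow (2:Int) h8nM),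
          show sayi % (2:Int) ^ M = (m : Int) by
            exact (Int.toNat_of_nonneg (Int.emod_nonneg _ (ne_of_gt hmodpos))).symm]
      rfl
    have hBalt : bellek_gosterimi_alt sayi bitsayisi
        = PySem.Str.join ""
            ((List.range (8*n)).foldl
              (fun acc k => pvG n m' acc ((((8*n : Nat) : Int) - 1) - ((k : Nat) : Int))) []) := by
      simp only [bellek_gosterimi_alt]
      rw [← hB, if_neg (not_le.mpr hb)]
      simp only [hv]
      simp only [show B * 8 = ((8*n : Nat) : Int) by omega]
      rw [PySem.List.pyRange_neg_one,
          show ((((8*n : Nat) : Int) - 1) - (-1)).toNat = 8*n by omega,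
          List.foldl_map]
      rfl
    have hBchars : (bellek_gosterimi_alt sayi bitsayisi).toList
        = List.intercalate [' ']
            ((List.range n).map (fun j => '[' :: (pvBits 8 (m / 256^(n-1-j) % 256) ++ [']']))) := by
      rw [hBalt, pvChunks n m' n le_rfl [], List.nil_append, PySem.Str.toList_join,
          show ("" : String).toList = [] from rfl]
      rw [show ∀ ps, PySem.Chars.join ([] : List Char) ps = List.intercalate [] ps from fun _ => rfl,
          pvIntercalateNil, pvFlatFlat, List.map_map]
      rw [show (List.range n).map ((fun c => ((c.map String.toList)).flatten) ∘ pvChunk n m')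
            = (List.range n).map (fun j => (if j = 0 then ([] : List Char) else [' '])
                ++ ('[' :: (pvBits 8 (m / 256^(n-1-j) % 256) ++ [']']))) by
          refine List.map_congr_left (fun j hj => ?_)
          have hjn : j < n := List.mem_range.mp hj
          have hbyte : m' / 256^(n-1-j) % 256 = m / 256^(n-1-j) % 256 := by
            rw [hm', show (256:Nat)^(n-1-j) = 2^(8*(n-1-j)) by
                  rw [show (256:Nat) = 2^8 by norm_num, ← pow_mul]]
            exact pvByteEq m n (n-1-j) (by omega)
          simp only [Function.comp_apply, pvChunkChars, hbyte]]
      rw [← pvIntercalateRange]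
    apply String.toList_inj.mp
    rw [hAchars, hBchars]

theorem bellek_gosterimi_spec : Claim_equal_bellek_gosterimi := by
  intro sayi bitsayisi _hdom
  exact pvMain sayi bitsayisi
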